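-- pv_equiv track=rewrite | github.com/Cortosis33/Privabio-NC-Experimentations | Approach_stat.py | Compute_I
-- ===== SOURCE A (Python) =====
-- def Make_partition(Indice_list):
--     """ A function for Compute_I.
--     """
--     I = []
--     n = len(Indice_list)
--     a_parcourir = [True for _ in range(n)]
--     for i in range(n):
--         if a_parcourir[i]:
--             tmp_K = [i]
--             for j in range(i+1, n):
--                 if a_parcourir[j]:
--                     if (Indice_list[i][0] == Indice_list[j][0]) or (Indice_list[i][0] == Indice_list[j][1]):
--                         tmp_K.append(j)
--                         a_parcourir[j] = False
--             I.append(tmp_K)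
--     return I
--
-- def Compute_I(V):
--     """ This function returns I a partition of N = {1,..,n}.
--     @param V The database.
--     @return A partition of N.
--     """
--     len_D = len(V)
--     n = len(V[0])
--     Indice_List = []
--     for i in range(n):
--         vect_tmp_0 = []
--         vect_tmp_1 = []
--         for j in range(len_D):
--             if V[j][i] == 0:
--                 vect_tmp_0.append(j)
--             else:
--                 vect_tmp_1.append(j)
--         Indice_List.append([vect_tmp_0, vect_tmp_1])
--     I = Make_partition(Indice_List)
--     return I
-- ===== SOURCE B (Python) =====
-- def Compute_I(V):
--     """Group column indices by a canonical zero-pattern key using a dict,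
--     in a single pass over the columns."""
--     n = len(V[0])
--     groups = {}
--     for i in range(n):
--         b = tuple(row[i] == 0 for row in V)
--         if not b[0]:
--             b = tuple(not x for x in b)
--         groups.setdefault(b, []).append(i)
--     return list(groups.values())
-- ===== Notes on version B (the rewrite author's own statement) =====
-- stated objective: alternative
-- what changed: Replaces the pairwise greedy scan (compare each column's zero/one index lists against every later column, with a visited array) by a single pass that canonicalises each column's boolean zero-pattern (flip so the first entry is True) and groups column indices in a dict keyed by that pattern.
import Mathlib
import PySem

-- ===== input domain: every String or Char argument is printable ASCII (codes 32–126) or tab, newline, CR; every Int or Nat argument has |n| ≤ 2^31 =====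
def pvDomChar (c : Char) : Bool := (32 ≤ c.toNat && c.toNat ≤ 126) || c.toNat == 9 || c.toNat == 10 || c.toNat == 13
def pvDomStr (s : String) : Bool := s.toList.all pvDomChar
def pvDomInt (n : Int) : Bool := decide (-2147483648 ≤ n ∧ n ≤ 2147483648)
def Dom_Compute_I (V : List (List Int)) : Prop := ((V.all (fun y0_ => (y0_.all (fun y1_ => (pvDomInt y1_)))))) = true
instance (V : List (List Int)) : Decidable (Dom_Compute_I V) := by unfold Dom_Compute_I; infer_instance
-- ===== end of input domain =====

-- B groups columns by a canonical zero-pattern key in a dict in a single pass, instead of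
-- A's pairwise greedy scan with a visited array; equal return value on all inputs where A returns (Pre_).

-- ===== PORT A =====
-- Make_partition: greedy scan with the a_parcourir visited array, transliterated.
def pvMakePartition (L : List (List Int × List Int)) : List (List Int) :=
  let n := L.length
  ((List.range n).foldl (fun (st : List (List Int) × List Bool) i =>
    if st.2.getD i true then
      let inner := (List.range' (i+1) (n - (i+1))).foldl
        (fun (q : List Int × List Bool) j =>
          if q.2.getD j true then
            if (L.getD i ([], [])).1 = (L.getD j ([], [])).1 ∨
               (L.getD i ([], [])).1 = (L.getD j ([], [])).2 then
              (q.1 ++ [(j : Int)], q.2.set j false)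
            else q
          else q) ([(i : Int)], st.2)
      (st.1 ++ [inner.1], inner.2)
    else st) ([], List.replicate n true)).1

def Compute_I (V : List (List Int)) : List (List Int) :=
  let lenD := V.length
  let n := V.headI.length
  let indiceList := (List.range n).foldl (fun acc i =>
    acc ++ [ (List.range lenD).foldl (fun (p : List Int × List Int) j =>
        if (V.getD j []).getD i 0 = 0 then (p.1 ++ [(j : Int)], p.2)
        else (p.1, p.2 ++ [(j : Int)])) ([], []) ]) []
  pvMakePartition indiceList

-- ===== PORT B =====
-- canonical key of column i: the boolean zero-pattern, flipped so its first entry is true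
-- (b[0] exists under Pre_; headD true only makes the port total).
def pvKey (V : List (List Int)) (i : Nat) : List Bool :=
  let b := V.map (fun row => row.getD i 0 == 0)
  if b.headD true then b else b.map (fun x => !x)

def Compute_I_alt (V : List (List Int)) : List (List Int) :=
  let n := V.headI.length
  let groups := (List.range n).foldl
    (fun (d : PySem.Dict (List Bool) (List Int)) i =>
      d.modify (pvKey V i) [] (· ++ [(i : Int)])) PySem.Dict.empty
  groups.values

-- ===== PRECONDITION & SPEC =====
-- Pre_ excludes exactly the inputs where the Python A raises IndexError:
-- the empty database (V[0]) and rows shorter than the first row (V[j][i]).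
def Pre_Compute_I (V : List (List Int)) : Prop :=
  V ≠ [] ∧ ∀ r ∈ V, V.headI.length ≤ r.length
instance (V : List (List Int)) : Decidable (Pre_Compute_I V) := by unfold Pre_Compute_I; infer_instance

def pvWitness_Compute_I : List (List Int) := [[0, 1, 1, 0], [1, 0, 0, 1]]

def Spec_Compute_I (V : List (List Int)) (out : List (List Int)) : Prop := out = Compute_I_alt V
instance (V : List (List Int)) (out : List (List Int)) : Decidable (Spec_Compute_I V out) := by unfold Spec_Compute_I; infer_instance

-- ===== CLAIM (what is proved, stated in full; the proofs are below) =====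
def Claim_equal_Compute_I : Prop := ∀ (V : List (List Int)), Dom_Compute_I V → Pre_Compute_I V → Spec_Compute_I V (Compute_I V)


-- ===== LEMMAS AND PROOFS =====

def pvB (V : List (List Int)) (i j : Nat) : Bool := (V.getD j []).getD i 0 == 0
def pvBvec (V : List (List Int)) (i : Nat) : List Bool := (List.range V.length).map (pvB V i)
theorem pvBvec_eq (V : List (List Int)) (i : Nat) :
    V.map (fun row => row.getD i 0 == 0) = pvBvec V i := by
  unfold pvBvec pvB
  apply List.ext_getElem
  · simp
  · intro j h1 h2
    simp at h1 ⊢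
    rw [List.getElem?_eq_getElem h1]
    simp

theorem pvKey_eq (V : List (List Int)) (i : Nat) :
    pvKey V i = if (pvBvec V i).headD true then pvBvec V i
                else (pvBvec V i).map (fun x => !x) := by
  unfold pvKey
  rw [pvBvec_eq]

theorem pvFilterRangeEq (p q : Nat → Bool) (m : Nat) :
    (List.range m).filter p = (List.range m).filter q ↔ ∀ j < m, p j = q j := by
  constructor
  · intro h j hj
    have := congrArg (fun l => j ∈ l) h
    simp [List.mem_filter, List.mem_range, hj] at this
    by_cases hp : p j <;> by_cases hq : q j <;> simp_all
  · intro h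
    apply List.filter_congr
    intro x hx
    exact h x (List.mem_range.mp hx)

theorem pvMapRangeEq {α : Type} (p q : Nat → α) (m : Nat) :
    (List.range m).map p = (List.range m).map q ↔ ∀ j < m, p j = q j := by
  constructor
  · intro h j hj
    have := congrArg (fun l => l[j]?) h
    simp [hj] at this
    exact this
  · intro h
    exact List.map_congr_left (fun x hx => h x (List.mem_range.mp hx))

theorem pvMapNotNot (l : List Bool) : (l.map (fun x => !x)).map (fun x => !x) = l := by
  simp [List.map_map, Function.comp_def]
def pvZ (V : List (List Int)) (i : Nat) : List Int :=
  ((List.range V.length).filter (pvB V i)).map (fun (j : Nat) => (j : Int))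
def pvO (V : List (List Int)) (i : Nat) : List Int :=
  ((List.range V.length).filter (fun j => !pvB V i j)).map (fun (j : Nat) => (j : Int))

theorem pvCastInj (l1 l2 : List Nat)
    (h : List.map (fun (j : Nat) => (j : Int)) l1 = List.map (fun (j : Nat) => (j : Int)) l2) : l1 = l2 := by
  apply List.ext_getElem
  · have := congrArg List.length h
    simpa using this
  · intro j h1 h2
    have := congrArg (fun l => l[j]?) h
    simp only [List.getElem?_map] at this
    rw [List.getElem?_eq_getElem h1, List.getElem?_eq_getElem h2] at this
    simp only [Option.map_some, Option.some.injEq] at this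
    exact_mod_cast this

theorem pvZ_eq_iff (V : List (List Int)) (i1 i2 : Nat) :
    pvZ V i1 = pvZ V i2 ↔ pvBvec V i1 = pvBvec V i2 := by
  unfold pvZ pvBvec
  rw [pvMapRangeEq]
  constructor
  · intro h
    exact (pvFilterRangeEq _ _ _).mp (pvCastInj _ _ h)
  · intro h
    rw [(pvFilterRangeEq _ _ _).mpr h]

theorem pvZO_eq_iff (V : List (List Int)) (i1 i2 : Nat) :
    pvZ V i1 = pvO V i2 ↔ pvBvec V i1 = (pvBvec V i2).map (fun x => !x) := by
  unfold pvZ pvO pvBvec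
  rw [List.map_map]
  have : ((fun x => !x) ∘ pvB V i2) = fun j => !pvB V i2 j := rfl
  rw [this, pvMapRangeEq]
  constructor
  · intro h
    exact (pvFilterRangeEq _ _ _).mp (pvCastInj _ _ h)
  · intro h
    rw [(pvFilterRangeEq _ _ _).mpr h]

theorem pvCanonEq (b1 b2 : List Bool) (h : b1.length = b2.length) :
    (b1 = b2 ∨ b1 = b2.map (fun x => !x)) ↔
      (if b1.headD true then b1 else b1.map (fun x => !x)) =
      (if b2.headD true then b2 else b2.map (fun x => !x)) := by
  match b1, b2 with
  | [], [] => simp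
  | [], y :: t2 => simp at h
  | x :: t1, [] => simp at h
  | x :: t1, y :: t2 =>
    cases x <;> cases y
    · simp only [List.headD_cons, Bool.false_eq_true, if_false]
      constructor
      · rintro (hh | hh)
        · rw [hh]
        · exfalso; simp at hh
      · intro hh
        left
        have := congrArg (List.map (fun x => !x)) hh
        rwa [pvMapNotNot, pvMapNotNot] at this
    · simp only [List.headD_cons, Bool.false_eq_true, if_false, if_true]
      constructor
      · rintro (hh | hh)
        · exfalso; simp at hh
        · have := congrArg (List.map (fun x => !x)) hh
          rwa [pvMapNotNot] at this
      · intro hh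
        right
        have := congrArg (List.map (fun x => !x)) hh
        rwa [pvMapNotNot] at this
    · simp only [List.headD_cons, Bool.false_eq_true, if_false, if_true]
      constructor
      · rintro (hh | hh)
        · exfalso; simp at hh
        · exact hh
      · intro hh; right; exact hh
    · simp only [List.headD_cons, if_true]
      constructor
      · rintro (hh | hh)
        · exact hh
        · exfalso; simp at hh
      · intro hh; left; exact hh

theorem pvRel_iff (V : List (List Int)) (i1 i2 : Nat) :
    (pvZ V i1 = pvZ V i2 ∨ pvZ V i1 = pvO V i2) ↔ pvKey V i1 = pvKey V i2 := by
  rw [pvZ_eq_iff, pvZO_eq_iff, pvKey_eq, pvKey_eq]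
  exact pvCanonEq _ _ (by simp [pvBvec])
theorem pvGetD_set_self (l : List Bool) (i : Nat) (b d : Bool) (h : i < l.length) :
    (l.set i b).getD i d = b := by
  simp [List.getD_eq_getElem?_getD, h]

theorem pvGetD_set_ne (l : List Bool) (i j : Nat) (b d : Bool) (h : i ≠ j) :
    (l.set i b).getD j d = l.getD j d := by
  simp [List.getD_eq_getElem?_getD, List.getElem?_set_ne h]

theorem pvInner (C : Nat → Prop) [DecidablePred C] :
    ∀ (l : List Nat) (acc : List Int) (ap : List Bool), l.Nodup → (∀ j ∈ l, j < ap.length) →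
    (l.foldl (fun (q : List Int × List Bool) j =>
        if q.2.getD j true then
          if C j then (q.1 ++ [(j : Int)], q.2.set j false) else q
        else q) (acc, ap)).1
      = acc ++ (l.filter (fun j => ap.getD j true && decide (C j))).map (fun (j : Nat) => (j : Int)) ∧
    ((l.foldl (fun (q : List Int × List Bool) j =>
        if q.2.getD j true then
          if C j then (q.1 ++ [(j : Int)], q.2.set j false) else q
        else q) (acc, ap)).2.length = ap.length ∧
     ∀ j', (l.foldl (fun (q : List Int × List Bool) j =>
        if q.2.getD j true then
          if C j then (q.1 ++ [(j : Int)], q.2.set j false) else q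
        else q) (acc, ap)).2.getD j' true
          = (ap.getD j' true && !(decide (j' ∈ l) && decide (C j')))) := by
  intro l
  induction l with
  | nil => intro acc ap _ _; simp
  | cons j t ih =>
    intro acc ap hnd hlt
    have hjlen : j < ap.length := hlt j (List.mem_cons_self)
    have hnd' := (List.nodup_cons.mp hnd).2
    have hjt : j ∉ t := (List.nodup_cons.mp hnd).1
    simp only [List.foldl_cons]
    by_cases hap : ap.getD j true
    · by_cases hC : C j
      · -- taken branch
        rw [if_pos hap, if_pos hC]
        obtain ⟨ih1, ih2, ih3⟩ := ih (acc ++ [(j : Int)]) (ap.set j false) hnd'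
          (by intro x hx; rw [List.length_set]; exact hlt x (List.mem_cons_of_mem _ hx))
        refine ⟨?_, ?_, ?_⟩
        · rw [ih1]
          have hfe : t.filter (fun j2 => (ap.set j false).getD j2 true && decide (C j2))
              = t.filter (fun j2 => ap.getD j2 true && decide (C j2)) := by
            apply List.filter_congr
            intro x hx
            exact congrArg (· && decide (C x)) (pvGetD_set_ne _ _ _ _ _ (fun he : j = x => hjt (he ▸ hx)))
          rw [hfe, List.filter_cons_of_pos (by simp only [Bool.and_eq_true, decide_eq_true_eq]; exact ⟨hap, hC⟩), List.map_cons]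
          simp
        · rw [ih2, List.length_set]
        · intro j'
          rw [ih3 j']
          by_cases hjj : j' = j
          · subst hjj
            rw [pvGetD_set_self _ _ _ _ hjlen, hap]
            simp [hC]
          · rw [pvGetD_set_ne _ _ _ _ _ (fun he => hjj he.symm)]
            simp [List.mem_cons, hjj]
      · rw [if_pos hap, if_neg hC]
        obtain ⟨ih1, ih2, ih3⟩ := ih acc ap hnd'
          (fun x hx => hlt x (List.mem_cons_of_mem _ hx))
        refine ⟨?_, ih2, ?_⟩
        · rw [ih1, List.filter_cons_of_neg (by simp only [Bool.and_eq_true, decide_eq_true_eq]; exact fun h => hC h.2)]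
        · intro j'
          rw [ih3 j']
          by_cases hjj : j' = j
          · subst hjj; simp [hC, Bool.and_comm]
          · simp [List.mem_cons, hjj]
    · rw [if_neg hap]
      obtain ⟨ih1, ih2, ih3⟩ := ih acc ap hnd'
        (fun x hx => hlt x (List.mem_cons_of_mem _ hx))
      refine ⟨?_, ih2, ?_⟩
      · rw [ih1, List.filter_cons_of_neg (by simp only [Bool.and_eq_true, decide_eq_true_eq]; exact fun h => hap h.1)]
      · intro j'
        rw [ih3 j']
        by_cases hjj : j' = j
        · subst hjj
          rw [Bool.eq_false_iff.mpr hap]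
          simp
        · simp [List.mem_cons, hjj]
def pvGroup (V : List (List Int)) (k : List Bool) : List Int :=
  ((List.range V.headI.length).filter (fun i => pvKey V i == k)).map (fun (j : Nat) => (j : Int))

theorem pvB_eq_alt (V : List (List Int)) : Compute_I_alt V =
    (PySem.Set.ofList ((List.range V.headI.length).map (pvKey V))).map (pvGroup V) := by
  unfold Compute_I_alt
  have hkeys : ((List.range V.headI.length).foldl
      (fun (d : PySem.Dict (List Bool) (List Int)) i =>
        d.modify (pvKey V i) [] (· ++ [(i : Int)])) PySem.Dict.empty).keys
      = PySem.Set.ofList ((List.range V.headI.length).map (pvKey V)) := by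
    rw [PySem.Dict.keys_foldl_modify_key (List.range V.headI.length) (pvKey V) []
      (fun _ i v => v ++ [(i : Int)]) PySem.Dict.empty]
    rw [PySem.Dict.keys_empty, PySem.Set.update_nil_left]
  have hnd : ((List.range V.headI.length).foldl
      (fun (d : PySem.Dict (List Bool) (List Int)) i =>
        d.modify (pvKey V i) [] (· ++ [(i : Int)])) PySem.Dict.empty).keys.Nodup := by
    apply PySem.Dict.nodup_keys_foldl_modify_key (List.range V.headI.length) (pvKey V) []
      (fun _ i v => v ++ [(i : Int)]) PySem.Dict.empty
    simp [PySem.Dict.keys_empty]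
  rw [PySem.Dict.values_eq_map_keys _ hnd []]
  rw [hkeys]
  apply List.map_congr_left
  intro k _
  have hfold : (List.range V.headI.length).foldl
      (fun (d : PySem.Dict (List Bool) (List Int)) i =>
        d.modify (pvKey V i) [] (· ++ [(i : Int)])) PySem.Dict.empty
      = (((List.range V.headI.length).map (fun i => (pvKey V i, (i : Int)))).foldl
          (fun d p => d.modify p.1 [] (· ++ [p.2])) PySem.Dict.empty) := by
    rw [List.foldl_map]
  rw [hfold, PySem.Dict.getD_foldl_modify_append, PySem.Dict.getD_empty]
  rw [List.filter_map]
  unfold pvGroup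
  rw [List.map_map]
  simp only [List.nil_append]
  rfl
def pvSeen (V : List (List Int)) (m j : Nat) : Bool :=
  (List.range m).any (fun i' => decide (i' < j) && (pvKey V i' == pvKey V j))
def pvAp (V : List (List Int)) (m : Nat) : List Bool :=
  (List.range V.headI.length).map (fun j => !pvSeen V m j)
def pvL (V : List (List Int)) : List (List Int × List Int) :=
  (List.range V.headI.length).map (fun i => (pvZ V i, pvO V i))

theorem pvSeen_succ (V : List (List Int)) (m j : Nat) :
    pvSeen V (m+1) j = (pvSeen V m j || (decide (m < j) && (pvKey V m == pvKey V j))) := by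
  unfold pvSeen
  rw [List.range_succ, List.any_append]
  simp

theorem pvSeen_iff (V : List (List Int)) (m j : Nat) :
    pvSeen V m j = true ↔ ∃ i', i' < m ∧ i' < j ∧ pvKey V i' = pvKey V j := by
  unfold pvSeen
  rw [List.any_eq_true]
  constructor
  · rintro ⟨x, hx, hb⟩
    simp only [Bool.and_eq_true, decide_eq_true_eq, beq_iff_eq] at hb
    exact ⟨x, List.mem_range.mp hx, hb.1, hb.2⟩
  · rintro ⟨x, h1, h2, h3⟩
    exact ⟨x, List.mem_range.mpr h1, by simp [h2, h3]⟩

theorem pvAp_getD (V : List (List Int)) (m j : Nat) (h : j < V.headI.length) :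
    (pvAp V m).getD j true = !pvSeen V m j := by
  unfold pvAp
  exact PySem.List.getD_map_range _ _ _ _ h

theorem pvAp_length (V : List (List Int)) (m : Nat) : (pvAp V m).length = V.headI.length := by
  simp [pvAp]

theorem pvL_getD (V : List (List Int)) (i : Nat) (h : i < V.headI.length) :
    (pvL V).getD i ([], []) = (pvZ V i, pvO V i) := by
  unfold pvL
  exact PySem.List.getD_map_range _ _ _ _ h

theorem pvCond_iff (V : List (List Int)) (i j : Nat) (hi : i < V.headI.length)
    (hj : j < V.headI.length) :
    (((pvL V).getD i ([], [])).1 = ((pvL V).getD j ([], [])).1 ∨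
     ((pvL V).getD i ([], [])).1 = ((pvL V).getD j ([], [])).2) ↔ pvKey V i = pvKey V j := by
  rw [pvL_getD V i hi, pvL_getD V j hj]
  exact pvRel_iff V i j
theorem pvOuter (V : List (List Int)) :
    ∀ m, m ≤ V.headI.length →
    (List.range m).foldl
      (fun (st : List (List Int) × List Bool) i =>
        if st.2.getD i true then
          let inner := (List.range' (i+1) (V.headI.length - (i+1))).foldl
            (fun (q : List Int × List Bool) j =>
              if q.2.getD j true then
                if ((pvL V).getD i ([], [])).1 = ((pvL V).getD j ([], [])).1 ∨
                   ((pvL V).getD i ([], [])).1 = ((pvL V).getD j ([], [])).2 then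
                  (q.1 ++ [(j : Int)], q.2.set j false)
                else q
              else q) ([(i : Int)], st.2)
          (st.1 ++ [inner.1], inner.2)
        else st) ([], List.replicate V.headI.length true)
    = ((PySem.Set.ofList ((List.range m).map (pvKey V))).map (pvGroup V), pvAp V m) := by
  intro m
  induction m with
  | zero =>
    intro _
    simp only [List.range_zero, List.foldl_nil, List.map_nil]
    have h0 : pvAp V 0 = List.replicate V.headI.length true := by
      unfold pvAp pvSeen
      simp [List.map_const']
    rw [h0]
    rfl
  | succ m ih =>
    intro hm
    have hmn : m < V.headI.length := Nat.lt_of_succ_le hm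
    conv_lhs => rw [List.range_succ]
    rw [List.foldl_append, ih (Nat.le_of_lt hmn), List.foldl_cons, List.foldl_nil]
    set n := V.headI.length with hn
    by_cases hseen : pvSeen V m m
    · -- m was already grouped: skip
      rw [if_neg (by rw [pvAp_getD V m m hmn, hseen]; simp)]
      have hGm : PySem.Set.ofList ((List.range (m+1)).map (pvKey V))
          = PySem.Set.ofList ((List.range m).map (pvKey V)) := by
        rw [List.range_succ, List.map_append, List.map_cons, List.map_nil,
          PySem.Set.ofList_append_singleton]
        apply PySem.Set.add_of_mem
        obtain ⟨i', hi', _, hk⟩ := (pvSeen_iff V m m).mp hseen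
        rw [PySem.Set.mem_ofList]
        exact List.mem_map.mpr ⟨i', List.mem_range.mpr hi', hk⟩
      have hApm : pvAp V (m+1) = pvAp V m := by
        unfold pvAp
        apply List.map_congr_left
        intro j _
        congr 1
        rw [pvSeen_succ]
        by_cases hc : (decide (m < j) && (pvKey V m == pvKey V j)) = true
        · simp only [Bool.and_eq_true, decide_eq_true_eq, beq_iff_eq] at hc
          obtain ⟨i', hi', _, hk⟩ := (pvSeen_iff V m m).mp hseen
          have : pvSeen V m j = true :=
            (pvSeen_iff V m j).mpr ⟨i', hi', Nat.lt_trans hi' hc.1, hk.trans hc.2⟩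
          simp [this]
        · rw [Bool.eq_false_iff.mpr hc]
          simp
      rw [hGm, hApm]
    · -- m is a fresh representative
      have hseenf : pvSeen V m m = false := Bool.eq_false_iff.mpr hseen
      rw [if_pos (by rw [pvAp_getD V m m hmn, hseenf]; simp)]
      simp only []
      have hnodup : (List.range' (m+1) (n - (m+1))).Nodup := List.nodup_range'
      have hmem : ∀ j ∈ List.range' (m+1) (n - (m+1)), m + 1 ≤ j ∧ j < n := by
        intro j hj
        have := List.mem_range'_1.mp hj
        omega
      obtain ⟨h1, h2, h3⟩ := pvInner
        (fun j => ((pvL V).getD m ([], [])).1 = ((pvL V).getD j ([], [])).1 ∨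
                  ((pvL V).getD m ([], [])).1 = ((pvL V).getD j ([], [])).2)
        (List.range' (m+1) (n - (m+1))) [(m : Int)] (pvAp V m) hnodup
        (by intro j hj; rw [pvAp_length]; exact (hmem j hj).2)
      rw [Prod.ext_iff]
      constructor
      · -- first components
        show _ ++ [_] = List.map (pvGroup V) (PySem.Set.ofList ((List.range (m+1)).map (pvKey V)))
        · rw [List.range_succ, List.map_append, List.map_cons, List.map_nil,
            PySem.Set.ofList_append_singleton,
            PySem.Set.add_of_not_mem (by
              rw [PySem.Set.mem_ofList]
              intro hmem'
              obtain ⟨i', hi', hk⟩ := List.mem_map.mp hmem'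
              exact hseen ((pvSeen_iff V m m).mpr
                ⟨i', List.mem_range.mp hi', List.mem_range.mp hi', hk⟩)),
            List.map_append]
          congr 1
          rw [h1]
          have hfe : (List.range' (m+1) (n - (m+1))).filter
                (fun j => (pvAp V m).getD j true &&
                  decide (((pvL V).getD m ([], [])).1 = ((pvL V).getD j ([], [])).1 ∨
                          ((pvL V).getD m ([], [])).1 = ((pvL V).getD j ([], [])).2))
              = (List.range' (m+1) (n - (m+1))).filter (fun j => pvKey V j == pvKey V m) := by
            apply List.filter_congr
            intro j hj
            obtain ⟨hj1, hj2⟩ := hmem j hj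
            have hdec : decide (((pvL V).getD m ([], [])).1 = ((pvL V).getD j ([], [])).1 ∨
                ((pvL V).getD m ([], [])).1 = ((pvL V).getD j ([], [])).2)
                = (pvKey V m == pvKey V j) := by
              by_cases hx : pvKey V m = pvKey V j
              · rw [decide_eq_true ((pvCond_iff V m j hmn hj2).mpr hx)]
                simp [hx]
              · rw [decide_eq_false (fun hc => hx ((pvCond_iff V m j hmn hj2).mp hc))]
                simp [hx]
            rw [hdec]
            by_cases hk : pvKey V j = pvKey V m
            · have hsj : pvSeen V m j = false := by
                rw [Bool.eq_false_iff]
                intro hs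
                obtain ⟨i', hi', hij, hk'⟩ := (pvSeen_iff V m j).mp hs
                exact hseen ((pvSeen_iff V m m).mpr ⟨i', hi', hi', hk'.trans hk⟩)
              rw [pvAp_getD V m j hj2, hsj]
              simp [hk]
            · have hk' : pvKey V m ≠ pvKey V j := fun h => hk h.symm
              rw [beq_eq_false_iff_ne.mpr hk', beq_eq_false_iff_ne.mpr hk]
              simp
          rw [hfe]
          simp only [List.map_cons, List.map_nil]
          apply congrArg (fun x => [x])
          unfold pvGroup
          rw [← hn]
          have hsplit : List.range n = List.range (m+1) ++ List.range' (m+1) (n - (m+1)) := by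
            calc List.range n = List.range' 0 n := List.range_eq_range'
              _ = List.range' 0 ((m+1) + (n-(m+1))) := by congr 1; omega
              _ = List.range' 0 (m+1) ++ List.range' (0+(m+1)) (n-(m+1)) :=
                  (List.range'_append_1 (s:=0) (m:=m+1) (n:=n-(m+1))).symm
              _ = List.range (m+1) ++ List.range' (m+1) (n-(m+1)) := by
                  rw [← List.range_eq_range', Nat.zero_add]
          rw [hsplit, List.filter_append, List.range_succ, List.filter_append]
          have hfm : (List.range m).filter (fun i => pvKey V i == pvKey V m) = [] := by
            rw [List.filter_eq_nil_iff]
            intro i hi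
            simp only [beq_iff_eq]
            intro hk
            exact hseen ((pvSeen_iff V m m).mpr
              ⟨i, List.mem_range.mp hi, List.mem_range.mp hi, hk⟩)
          rw [hfm]
          simp
      · -- second components
        apply List.ext_getElem
        · rw [h2, pvAp_length, pvAp_length]
        · intro j hj1 hj2
          have hjn : j < n := by rw [pvAp_length] at hj2; exact hj2
          have hgd := h3 j
          rw [List.getD_eq_getElem?_getD, List.getElem?_eq_getElem hj1] at hgd
          simp only [Option.getD_some] at hgd
          rw [hgd]
          have hgd2 : (pvAp V (m+1))[j] = (pvAp V (m+1)).getD j true := by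
            rw [List.getD_eq_getElem?_getD, List.getElem?_eq_getElem hj2]
            simp
          rw [hgd2, pvAp_getD V (m+1) j hjn, pvAp_getD V m j hjn, pvSeen_succ]
          have hmem' : decide (j ∈ List.range' (m+1) (n - (m+1))) = decide (m < j) := by
            apply decide_eq_decide.mpr
            rw [List.mem_range'_1]
            omega
          have hdec : decide (((pvL V).getD m ([], [])).1 = ((pvL V).getD j ([], [])).1 ∨
              ((pvL V).getD m ([], [])).1 = ((pvL V).getD j ([], [])).2)
              = (pvKey V m == pvKey V j) := by
            by_cases hx : pvKey V m = pvKey V j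
            · rw [decide_eq_true ((pvCond_iff V m j hmn hjn).mpr hx)]
              simp [hx]
            · rw [decide_eq_false (fun hc => hx ((pvCond_iff V m j hmn hjn).mp hc))]
              simp [hx]
          rw [hmem', hdec, Bool.not_or, Bool.not_and]
theorem pvIndice (V : List (List Int)) :
    (List.range V.headI.length).foldl (fun acc i =>
      acc ++ [ (List.range V.length).foldl (fun (p : List Int × List Int) j =>
          if (V.getD j []).getD i 0 = 0 then (p.1 ++ [(j : Int)], p.2)
          else (p.1, p.2 ++ [(j : Int)])) ([], []) ]) []
    = pvL V := by
  rw [PySem.List.foldl_append_singleton_eq_map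
    (f := fun i => (List.range V.length).foldl (fun (p : List Int × List Int) j =>
      if (V.getD j []).getD i 0 = 0 then (p.1 ++ [(j : Int)], p.2)
      else (p.1, p.2 ++ [(j : Int)])) ([], []))]
  rw [List.nil_append]
  unfold pvL
  apply List.map_congr_left
  intro i _
  have hstep : (fun (p : List Int × List Int) (j : Nat) =>
      if (V.getD j []).getD i 0 = 0 then (p.1 ++ [(j : Int)], p.2)
      else (p.1, p.2 ++ [(j : Int)]))
    = (fun (p : List Int × List Int) (j : Nat) =>
      ((fun (a : List Int) (j : Nat) => if pvB V i j then a ++ [(j : Int)] else a) p.1 j,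
       (fun (a : List Int) (j : Nat) => if !pvB V i j then a ++ [(j : Int)] else a) p.2 j)) := by
    funext p j
    by_cases h : (V.getD j []).getD i 0 = 0
    · have hb : pvB V i j = true := beq_iff_eq.mpr h
      rw [if_pos h]
      simp [hb]
    · have hb : pvB V i j = false := beq_eq_false_iff_ne.mpr h
      rw [if_neg h]
      simp [hb]
  rw [hstep, PySem.List.foldl_prod_mk
    (f := fun (a : List Int) (j : Nat) => if pvB V i j = true then a ++ [(j : Int)] else a)
    (g := fun (a : List Int) (j : Nat) => if (!pvB V i j) = true then a ++ [(j : Int)] else a)]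
  unfold pvZ pvO
  rw [PySem.List.foldl_append_if, PySem.List.foldl_append_if]
  simp

theorem pvA_eq (V : List (List Int)) : Compute_I V =
    (PySem.Set.ofList ((List.range V.headI.length).map (pvKey V))).map (pvGroup V) := by
  unfold Compute_I
  dsimp only
  rw [pvIndice]
  unfold pvMakePartition
  dsimp only
  have hlen : (pvL V).length = V.headI.length := by simp [pvL]
  rw [hlen]
  have := pvOuter V V.headI.length (le_refl _)
  rw [this]

-- ===== VERDICT (by name: the statement is the Claim_ definition above) =====
theorem Compute_I_spec : Claim_equal_Compute_I := by
  intro V _ _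
  unfold Spec_Compute_I
  rw [pvA_eq, pvB_eq_alt]
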